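-- pv_equiv track=rewrite | github.com/JordanYHChan/AdventOfCode | 2024/Day9/main.py | get_empty_block_left_rights
-- ===== SOURCE A (Python) =====
-- def get_empty_block_left_rights(disk):
--
--     empty_block_left_rights = []
--     empty_block_start = None
--
--     for index, file in enumerate(disk):
--         if file == ".":
--             empty_block_start = index if empty_block_start is None else empty_block_start
--             continue
--
--         if empty_block_start is not None:
--             empty_block_left_rights.append((empty_block_start, index))
--             empty_block_start = None
--
--     return empty_block_left_rights
-- ===== SOURCE B (Python) =====
-- def get_empty_block_left_rights(disk):
--     # Two-pointer run scan: jump over each maximal run of "." in one inner step,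
--     # emitting (i, j) only when the run is followed by a file block.
--     res = []
--     n = len(disk)
--     i = 0
--     while i < n:
--         if disk[i] != ".":
--             i += 1
--         else:
--             j = i
--             while j < n and disk[j] == ".":
--                 j += 1
--             if j < n:
--                 res.append((i, j))
--             i = j
--     return res
-- ===== Notes on version B (the rewrite author's own statement) =====
-- stated objective: alternative
-- what changed: Replaced A's element-by-element enumerate scan carrying an Option start-index across iterations with a run-based scanner that consumes each maximal '.' run in one inner step and emits (pos, pos+k) only when the run is followed by a file block.
import Mathlib
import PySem

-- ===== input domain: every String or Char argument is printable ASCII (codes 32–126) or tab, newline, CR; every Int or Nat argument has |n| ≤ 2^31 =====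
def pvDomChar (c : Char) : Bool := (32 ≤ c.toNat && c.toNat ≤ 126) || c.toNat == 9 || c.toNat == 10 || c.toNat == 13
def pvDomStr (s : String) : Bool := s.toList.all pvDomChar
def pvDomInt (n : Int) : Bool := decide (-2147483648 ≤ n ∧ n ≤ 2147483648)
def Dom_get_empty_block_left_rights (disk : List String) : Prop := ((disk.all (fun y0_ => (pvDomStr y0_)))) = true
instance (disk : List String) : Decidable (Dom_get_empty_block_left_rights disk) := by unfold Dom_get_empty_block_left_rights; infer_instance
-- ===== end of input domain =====

-- B replaces A's per-element scan (Option start index carried across iterations) with a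
-- two-pointer scan that jumps over each maximal '.' run in one inner step; alternative structure.

-- ===== PORT A =====
-- literal transliteration of A: foldl over enumerate(disk) with state (result, empty_block_start)
def get_empty_block_left_rights (disk : List String) : List (Int × Int) :=
  ((PySem.List.enumerate disk 0).foldl
    (fun (st : List (Int × Int) × Option Int) (p : Int × String) =>
      if p.2 = "." then
        (st.1, some (match st.2 with | none => p.1 | some v => v))
      else
        match st.2 with
        | some v => (st.1 ++ [(v, p.1)], none)
        | none => st)
    ([], none)).1

-- ===== PORT B =====
-- B's inner while loop: first index ≥ j holding a non-"." block (or disk length)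
def pvScanDots (disk : List String) (j : Nat) : Nat :=
  if h : j < disk.length then
    if disk[j] = "." then pvScanDots disk (j + 1) else j
  else j
termination_by disk.length - j

-- needed by pvBLoop's termination proof
theorem pvScanDots_ge (disk : List String) (j : Nat) : j ≤ pvScanDots disk j := by
  rw [pvScanDots]
  split_ifs with h1 h2
  · have := pvScanDots_ge disk (j + 1); omega
  · exact le_refl j
  · exact le_refl j
termination_by disk.length - j

-- B's outer while loop over the index i
def pvBLoop (disk : List String) (i : Nat) : List (Int × Int) :=
  if h : i < disk.length then
    if disk[i] ≠ "." then pvBLoop disk (i + 1)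
    else
      let j := pvScanDots disk i
      (if j < disk.length then [((i : Int), (j : Int))] else []) ++ pvBLoop disk j
  else []
termination_by disk.length - i
decreasing_by
  · omega
  · have h1 : pvScanDots disk i = pvScanDots disk (i + 1) := by
      rw [pvScanDots]; simp_all
    have h2 := pvScanDots_ge disk (i + 1)
    omega

def get_empty_block_left_rights_alt (disk : List String) : List (Int × Int) :=
  pvBLoop disk 0

-- ===== PRECONDITION & SPEC =====
def Spec_get_empty_block_left_rights (disk : List String) (out : List (Int × Int)) : Prop := out = get_empty_block_left_rights_alt disk
instance (disk : List String) (out : List (Int × Int)) : Decidable (Spec_get_empty_block_left_rights disk out) := by unfold Spec_get_empty_block_left_rights; infer_instance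

-- ===== CLAIM (what is proved, stated in full; the proofs are below) =====
def Claim_equal_get_empty_block_left_rights : Prop := ∀ (disk : List String), Dom_get_empty_block_left_rights disk → Spec_get_empty_block_left_rights disk (get_empty_block_left_rights disk)

-- ===== LEMMAS AND PROOFS =====

-- number of leading "." blocks of a list
def pvDotRun : List String → Nat
  | [] => 0
  | x :: xs => if x = "." then pvDotRun xs + 1 else 0

lemma pvDotRun_pos (x : String) (xs : List String) (h : x = ".") :
    1 ≤ pvDotRun (x :: xs) := by
  simp [pvDotRun, h]

lemma pvDotRun_le (xs : List String) : pvDotRun xs ≤ xs.length := by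
  induction xs with
  | nil => simp [pvDotRun]
  | cons x xs ih => by_cases hx : x = "." <;> simp [pvDotRun, hx] <;> omega

-- structural (suffix-based) view of B's loop, used as a stepping stone between the two ports
def pvAltLoop (pos : Int) (rest : List String) : List (Int × Int) :=
  match rest with
  | [] => []
  | x :: xs =>
    if h : x = "." then
      let k := pvDotRun (x :: xs)
      (if k < (x :: xs).length then [(pos, pos + (k : Int))] else []) ++
        pvAltLoop (pos + (k : Int)) ((x :: xs).drop k)
    else pvAltLoop (pos + 1) xs
termination_by rest.length
decreasing_by
  · simp only [List.length_drop]
    have := pvDotRun_pos x xs h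
    simp only [List.length_cons]
    omega
  · simp

lemma pvAltLoop_nil (pos : Int) : pvAltLoop pos [] = [] := by rw [pvAltLoop]

lemma pvAltLoop_nondot (pos : Int) (x : String) (xs : List String) (h : ¬ x = ".") :
    pvAltLoop pos (x :: xs) = pvAltLoop (pos + 1) xs := by
  rw [pvAltLoop]; simp [h]

lemma pvAltLoop_dot (pos : Int) (x : String) (xs : List String) (h : x = ".") :
    pvAltLoop pos (x :: xs) =
      (if pvDotRun (x :: xs) < (x :: xs).length then
        [(pos, pos + (pvDotRun (x :: xs) : Int))] else []) ++
      pvAltLoop (pos + (pvDotRun (x :: xs) : Int)) ((x :: xs).drop (pvDotRun (x :: xs))) := by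
  rw [pvAltLoop]; simp [h]

-- A's loop as a recursion with explicit absolute index j and state (acc, st)
def pvAfold (j : Int) (acc : List (Int × Int)) (st : Option Int) : List String → List (Int × Int)
  | [] => acc
  | x :: xs =>
    if x = "." then pvAfold (j + 1) acc (some (st.getD j)) xs
    else
      match st with
      | some v => pvAfold (j + 1) (acc ++ [(v, j)]) none xs
      | none => pvAfold (j + 1) acc none xs

lemma afold_eq_foldl (xs : List String) : ∀ (j : Int) (acc : List (Int × Int)) (st : Option Int),
    ((PySem.List.enumerate xs j).foldl
      (fun (s : List (Int × Int) × Option Int) (p : Int × String) =>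
        if p.2 = "." then
          (s.1, some (match s.2 with | none => p.1 | some v => v))
        else
          match s.2 with
          | some v => (s.1 ++ [(v, p.1)], none)
          | none => s)
      (acc, st)).1 = pvAfold j acc st xs := by
  induction xs with
  | nil => intro j acc st; simp [PySem.List.enumerate_nil, pvAfold]
  | cons x xs ih =>
    intro j acc st
    rw [PySem.List.enumerate_cons]
    by_cases hx : x = "."
    · cases st <;> simp [hx, List.foldl_cons, pvAfold, ih]
    · cases st <;> simp [hx, List.foldl_cons, pvAfold, ih]

lemma pvMain (xs : List String) : ∀ (j : Int) (acc : List (Int × Int)),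
    (pvAfold j acc none xs = acc ++ pvAltLoop j xs) ∧
    (∀ v : Int, pvAfold j acc (some v) xs =
      acc ++ (if pvDotRun xs < xs.length then
        (v, j + (pvDotRun xs : Int)) :: pvAltLoop (j + (pvDotRun xs : Int)) (xs.drop (pvDotRun xs))
      else [])) := by
  induction xs with
  | nil =>
    intro j acc
    constructor
    · simp [pvAfold, pvAltLoop]
    · intro v; simp [pvAfold, pvDotRun]
  | cons x xs ih =>
    intro j acc
    by_cases hx : x = "."
    · subst hx
      have hr : pvDotRun ("." :: xs) = pvDotRun xs + 1 := by simp [pvDotRun]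
      constructor
      · rw [pvAltLoop]
        have h2 := (ih (j + 1) acc).2 j
        simp only [pvAfold, if_pos rfl, Option.getD_none, h2, hr, dif_pos rfl,
          List.length_cons, List.drop_succ_cons]
        by_cases hlt : pvDotRun xs < xs.length
        · simp only [if_pos hlt, if_pos (by omega : pvDotRun xs + 1 < xs.length + 1)]
          have hji : j + 1 + (pvDotRun xs : Int) = j + ((pvDotRun xs : Nat) + 1 : Nat) := by
            push_cast; ring
          simp [hji]
        · have hle := pvDotRun_le xs
          have hd : List.drop (pvDotRun xs) xs = [] := by
            apply List.drop_of_length_le; omega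
          simp [hlt, hd, pvAltLoop_nil, if_neg (by omega : ¬ (pvDotRun xs + 1 < xs.length + 1))]
      · intro v
        have h2 := (ih (j + 1) acc).2 v
        simp only [pvAfold, if_pos rfl, Option.getD_some, h2, hr,
          List.length_cons, List.drop_succ_cons]
        by_cases hlt : pvDotRun xs < xs.length
        · simp only [if_pos hlt, if_pos (by omega : pvDotRun xs + 1 < xs.length + 1)]
          have hji : j + 1 + (pvDotRun xs : Int) = j + ((pvDotRun xs : Nat) + 1 : Nat) := by
            push_cast; ring
          simp [hji]
        · simp [hlt, if_neg (by omega : ¬ (pvDotRun xs + 1 < xs.length + 1))]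
    · constructor
      · have h1 := (ih (j + 1) acc).1
        simp only [pvAfold, if_neg hx, h1, pvAltLoop_nondot j x xs hx]
      · intro v
        have h1 := (ih (j + 1) (acc ++ [(v, j)])).1
        have hr : pvDotRun (x :: xs) = 0 := by simp [pvDotRun, hx]
        simp only [pvAfold, if_neg hx, h1, hr, List.length_cons,
          if_pos (by omega : 0 < xs.length + 1), List.drop_zero, Nat.cast_zero, add_zero,
          pvAltLoop_nondot j x xs hx]
        simp

theorem pvScanDots_eq (disk : List String) (j : Nat) (hj : j ≤ disk.length) :
    pvScanDots disk j = j + pvDotRun (disk.drop j) := by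
  rw [pvScanDots]
  split_ifs with h1 h2
  · have ih := pvScanDots_eq disk (j + 1) (by omega)
    rw [List.drop_eq_getElem_cons h1]
    simp only [pvDotRun, if_pos h2]
    omega
  · rw [List.drop_eq_getElem_cons h1]
    simp [pvDotRun, h2]
  · have hd : disk.drop j = [] := List.drop_of_length_le (by omega)
    simp [hd, pvDotRun]
termination_by disk.length - j

theorem pvBLoop_eq (disk : List String) (i : Nat) (hi : i ≤ disk.length) :
    pvBLoop disk i = pvAltLoop (i : Int) (disk.drop i) := by
  rw [pvBLoop]
  split_ifs with h1 h2
  · -- i < length, disk[i] ≠ "."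
    have ih := pvBLoop_eq disk (i + 1) (by omega)
    rw [List.drop_eq_getElem_cons h1, pvAltLoop_nondot _ _ _ h2, ih]
    push_cast; ring_nf
  · -- i < length, disk[i] = "."
    have hdot : disk[i] = "." := by
      by_contra hc; exact h2 hc
    have hcons : disk.drop i = disk[i] :: disk.drop (i + 1) := List.drop_eq_getElem_cons h1
    have hrun : pvScanDots disk i = i + pvDotRun (disk.drop i) := pvScanDots_eq disk i (by omega)
    have hle : pvDotRun (disk.drop i) ≤ disk.length - i := by
      have := pvDotRun_le (disk.drop i); simpa using this
    have hge : 1 ≤ pvDotRun (disk.drop i) := by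
      rw [hcons]; exact pvDotRun_pos _ _ hdot
    have ih := pvBLoop_eq disk (pvScanDots disk i) (by omega)
    simp only []
    rw [ih, hrun]
    conv_rhs => rw [hcons, pvAltLoop_dot (i : Int) disk[i] (disk.drop (i + 1)) hdot]
    rw [← hcons]
    have hdd : List.drop (pvDotRun (disk.drop i)) (disk.drop i) =
        disk.drop (i + pvDotRun (disk.drop i)) := by
      rw [List.drop_drop]
      try ring_nf
    have hlen : (disk.drop i).length = disk.length - i := by simp
    rw [hdd]
    by_cases hlt : i + pvDotRun (disk.drop i) < disk.length
    · rw [if_pos hlt, if_pos (by omega : pvDotRun (disk.drop i) < (disk.drop i).length)]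
      push_cast
      try ring_nf
    · rw [if_neg hlt, if_neg (by omega : ¬ pvDotRun (disk.drop i) < (disk.drop i).length)]
      push_cast
      try ring_nf
  · -- i = length
    have hd : disk.drop i = [] := List.drop_of_length_le (by omega)
    rw [hd, pvAltLoop_nil]
termination_by disk.length - i
decreasing_by
  all_goals first
    | omega
    | (have hrun := pvScanDots_eq disk i (by omega)
       have hge : 1 ≤ pvDotRun (disk.drop i) := by
         rw [List.drop_eq_getElem_cons h1]
         apply pvDotRun_pos
         by_contra hc; exact h2 hc
       omega)

-- ===== VERDICT (by name: the statement is the Claim_ definition above) =====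
theorem get_empty_block_left_rights_spec : Claim_equal_get_empty_block_left_rights := by
  intro disk _
  unfold Spec_get_empty_block_left_rights get_empty_block_left_rights get_empty_block_left_rights_alt
  rw [afold_eq_foldl, pvBLoop_eq disk 0 (by omega)]
  simpa using (pvMain disk 0 []).1
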